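-- pv_equiv track=rewrite | github.com/sonalij06/GithubAction | test.py | compute_gate_output
-- ===== SOURCE A (Python) =====
-- def compute_gate_output(gate, input1, input2):
--     if gate == "AND":
--         return [a & b for a, b in zip(input1, input2)]
--     elif gate == "OR":
--         return [a | b for a, b in zip(input1, input2)]
--     elif gate == "NAND":
--         return [~(a & b) & 1 for a, b in zip(input1, input2)]
--     elif gate == "NOR":
--         return [~(a | b) & 1 for a, b in zip(input1, input2)]
--     elif gate == "XOR":
--         return [a ^ b for a, b in zip(input1, input2)]
--     else:
--         raise ValueError(f"Unsupported gate: {gate}")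
-- ===== SOURCE B (Python) =====
-- _COEF = {
--     # result = p*a + q*b + r*(a & b); neg=True means take the complemented low bit: 1 - v % 2.
--     # Correct by the ring identities a|b = a+b-(a&b), a^b = a+b-2*(a&b), ~v & 1 = 1 - v % 2.
--     "AND":  (0, 0, 1, False),
--     "OR":   (1, 1, -1, False),
--     "XOR":  (1, 1, -2, False),
--     "NAND": (0, 0, 1, True),
--     "NOR":  (1, 1, -1, True),
-- }
--
-- def compute_gate_output(gate, input1, input2):
--     if gate not in _COEF:
--         raise ValueError(f"Unsupported gate: {gate}")
--     p, q, r, neg = _COEF[gate]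
--     out = []
--     for a, b in zip(input1, input2):
--         v = p * a + q * b + r * (a & b)
--         out.append(1 - v % 2 if neg else v)
--     return out
-- ===== Notes on version B (the rewrite author's own statement) =====
-- stated objective: alternative
-- what changed: B replaces the five distinct bitwise comprehensions by one uniform arithmetic formula p*a+q*b+r*(a&b) from a coefficient table (OR and XOR derived from AND by the ring identities a|b=a+b-(a&b), a^b=a+b-2*(a&b); NAND/NOR take the complemented low bit as 1-v%2), so '&' is the only bitwise operator used.
import Mathlib
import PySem

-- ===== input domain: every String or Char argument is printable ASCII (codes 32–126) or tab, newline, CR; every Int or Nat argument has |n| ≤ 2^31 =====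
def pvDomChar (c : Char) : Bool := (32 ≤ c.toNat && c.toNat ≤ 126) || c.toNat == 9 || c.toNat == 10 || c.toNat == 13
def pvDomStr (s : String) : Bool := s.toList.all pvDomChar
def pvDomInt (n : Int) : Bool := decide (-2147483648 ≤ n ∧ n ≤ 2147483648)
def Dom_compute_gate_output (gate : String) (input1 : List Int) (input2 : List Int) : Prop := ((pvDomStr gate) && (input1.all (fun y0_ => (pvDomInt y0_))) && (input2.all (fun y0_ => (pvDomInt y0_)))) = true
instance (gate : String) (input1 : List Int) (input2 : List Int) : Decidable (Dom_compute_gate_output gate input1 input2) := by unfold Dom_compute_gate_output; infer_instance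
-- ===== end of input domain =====

-- B replaces the five bitwise comprehensions by one uniform formula p*a + q*b + r*(a & b) from a
-- coefficient table (OR/XOR via the ring identities a|b = a+b-(a&b), a^b = a+b-2*(a&b); NAND/NOR as
-- the complemented low bit 1 - v % 2), so '&' is the only bitwise operator B uses (alternative; same cost).

-- ===== PORT A =====
-- literal transliteration of A's if/elif chain; & | ^ ~ are PySem.Int.band/bor/bxor and Int.not
def compute_gate_output (gate : String) (input1 : List Int) (input2 : List Int) : List Int :=
  if gate = "AND" then
    (input1.zip input2).map (fun p => PySem.Int.band p.1 p.2)
  else if gate = "OR" then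
    (input1.zip input2).map (fun p => PySem.Int.bor p.1 p.2)
  else if gate = "NAND" then
    (input1.zip input2).map (fun p => PySem.Int.band (Int.not (PySem.Int.band p.1 p.2)) 1)
  else if gate = "NOR" then
    (input1.zip input2).map (fun p => PySem.Int.band (Int.not (PySem.Int.bor p.1 p.2)) 1)
  else if gate = "XOR" then
    (input1.zip input2).map (fun p => PySem.Int.bxor p.1 p.2)
  else
    []  -- Python raises ValueError here; excluded by Pre_

-- ===== PORT B =====
-- B: one uniform formula p*a + q*b + r*(a & b) per element, from a coefficient table;
-- neg = true means return the complemented low bit 1 - v % 2 (NAND/NOR).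
def pvCOEF : List (String × (Int × Int × Int × Bool)) :=
  [("AND",  (0, 0, 1, false)),
   ("OR",   (1, 1, -1, false)),
   ("XOR",  (1, 1, -2, false)),
   ("NAND", (0, 0, 1, true)),
   ("NOR",  (1, 1, -1, true))]

def compute_gate_output_alt (gate : String) (input1 : List Int) (input2 : List Int) : List Int :=
  match (PySem.Dict.mk pvCOEF).get? gate with
  | none => []  -- Python raises ValueError here; excluded by Pre_
  | some (p, q, r, neg) =>
    -- the for loop appending to out
    (input1.zip input2).foldl
      (fun out ab =>
        let v : Int := p * ab.1 + q * ab.2 + r * PySem.Int.band ab.1 ab.2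
        out ++ [if neg then 1 - PySem.Int.mod v 2 else v]) []

-- ===== PRECONDITION & SPEC =====
-- Pre_ excludes exactly the gate names on which A raises ValueError("Unsupported gate: ..."); B raises there too.
def Pre_compute_gate_output (gate : String) (input1 : List Int) (input2 : List Int) : Prop :=
  gate = "AND" ∨ gate = "OR" ∨ gate = "NAND" ∨ gate = "NOR" ∨ gate = "XOR"
instance (gate : String) (input1 : List Int) (input2 : List Int) : Decidable (Pre_compute_gate_output gate input1 input2) := by unfold Pre_compute_gate_output; infer_instance

def pvWitness_compute_gate_output : String × List Int × List Int := ("NAND", [0, 1, 1], [1, 1, 0])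

def Spec_compute_gate_output (gate : String) (input1 : List Int) (input2 : List Int) (out : List Int) : Prop := out = compute_gate_output_alt gate input1 input2
instance (gate : String) (input1 : List Int) (input2 : List Int) (out : List Int) : Decidable (Spec_compute_gate_output gate input1 input2 out) := by unfold Spec_compute_gate_output; infer_instance

-- ===== CLAIM =====
def Claim_equal_compute_gate_output : Prop := ∀ (gate : String) (input1 : List Int) (input2 : List Int), Dom_compute_gate_output gate input1 input2 → Pre_compute_gate_output gate input1 input2 → Spec_compute_gate_output gate input1 input2 (compute_gate_output gate input1 input2)

-- ===== LEMMAS AND PROOFS =====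

-- Nat: each bit position is counted twice in & + | where both bits are set, once otherwise
theorem pv_nat_and_add_or : ∀ m n : Nat, (m &&& n) + (m ||| n) = m + n := by
  intro m
  induction m using Nat.binaryRec with
  | zero => intro n; simp
  | bit bm m ih =>
    intro n
    induction n using Nat.binaryRec with
    | zero => simp
    | bit bn n _ =>
      rw [Nat.land_bit, Nat.lor_bit]
      have h := ih n
      simp only [Nat.bit_val]
      cases bm <;> cases bn <;> simp <;> omega

theorem pv_nat_xor_add_two_and : ∀ m n : Nat, (m ^^^ n) + 2 * (m &&& n) = m + n := by
  intro m
  induction m using Nat.binaryRec with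
  | zero => intro n; simp
  | bit bm m ih =>
    intro n
    induction n using Nat.binaryRec with
    | zero => simp
    | bit bn n _ =>
      rw [Nat.xor_bit, Nat.land_bit]
      have h := ih n
      simp only [Nat.bit_val]
      cases bm <;> cases bn <;> simp <;> omega

-- Int (Python two's complement): a | b = a + b - (a & b)
theorem pv_bor_eq (a b : Int) : PySem.Int.bor a b = a + b - PySem.Int.band a b := by
  unfold PySem.Int.bor PySem.Int.band
  split_ifs with ha hb hb
  · have h := pv_nat_and_add_or a.toNat b.toNat
    omega
  · have h1 : (-b - 1).toNat &&& a.toNat ≤ (-b - 1).toNat := Nat.and_le_left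
    have h2 : a.toNat &&& (-b - 1).toNat = (-b - 1).toNat &&& a.toNat := Nat.land_comm _ _
    have h3 : a.toNat &&& (-b - 1).toNat ≤ a.toNat := Nat.and_le_left
    omega
  · have h1 : (-a - 1).toNat &&& b.toNat ≤ (-a - 1).toNat := Nat.and_le_left
    have h3 : b.toNat &&& (-a - 1).toNat ≤ b.toNat := Nat.and_le_left
    have h2 : b.toNat &&& (-a - 1).toNat = (-a - 1).toNat &&& b.toNat := Nat.land_comm _ _
    omega
  · have h := pv_nat_and_add_or (-a - 1).toNat (-b - 1).toNat
    omega

-- Int (Python two's complement): a ^ b = a + b - 2 * (a & b)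
theorem pv_bxor_eq (a b : Int) : PySem.Int.bxor a b = a + b - 2 * PySem.Int.band a b := by
  unfold PySem.Int.bxor PySem.Int.band
  split_ifs with ha hb hb
  · have h := pv_nat_xor_add_two_and a.toNat b.toNat
    omega
  · have h := pv_nat_xor_add_two_and a.toNat (-b - 1).toNat
    have h3 : a.toNat &&& (-b - 1).toNat ≤ a.toNat := Nat.and_le_left
    omega
  · have h := pv_nat_xor_add_two_and (-a - 1).toNat b.toNat
    have h2 : b.toNat &&& (-a - 1).toNat = (-a - 1).toNat &&& b.toNat := Nat.land_comm _ _
    have h3 : b.toNat &&& (-a - 1).toNat ≤ b.toNat := Nat.and_le_left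
    omega
  · have h := pv_nat_xor_add_two_and (-a - 1).toNat (-b - 1).toNat
    have h1 := pv_nat_and_add_or (-a - 1).toNat (-b - 1).toNat
    omega

theorem pv_not_eq (v : Int) : Int.not v = -v - 1 := by
  cases v <;> simp [Int.not] <;> omega

-- ~v & 1 = 1 - v % 2 (Python floor mod)
theorem pv_not_band_one (v : Int) : PySem.Int.band (Int.not v) 1 = 1 - PySem.Int.mod v 2 := by
  rw [PySem.Int.band_one, PySem.Int.mod_eq_emod_of_pos (by norm_num),
      PySem.Int.mod_eq_emod_of_pos (by norm_num), pv_not_eq]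
  omega

-- the for loop appending one element per pair is map
theorem pv_foldl_append_map {α β : Type} (f : α → β) (l : List α) (acc : List β) :
    l.foldl (fun out ab => out ++ [f ab]) acc = acc ++ l.map f := by
  induction l generalizing acc with
  | nil => simp
  | cons x xs ih => simp [List.foldl, ih]

-- evaluating B's port once the table lookup is resolved
theorem pv_alt_eval (gate : String) (p q r : Int) (neg : Bool)
    (h : (PySem.Dict.mk pvCOEF).get? gate = some (p, q, r, neg)) (input1 input2 : List Int) :
    compute_gate_output_alt gate input1 input2 =
      (input1.zip input2).map (fun ab =>
        let v : Int := p * ab.1 + q * ab.2 + r * PySem.Int.band ab.1 ab.2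
        if neg then 1 - PySem.Int.mod v 2 else v) := by
  unfold compute_gate_output_alt
  rw [h]
  have e := pv_foldl_append_map
    (fun ab : Int × Int =>
      let v : Int := p * ab.1 + q * ab.2 + r * PySem.Int.band ab.1 ab.2
      if neg then 1 - PySem.Int.mod v 2 else v)
    (input1.zip input2) []
  simpa using e

-- ===== VERDICT =====
theorem compute_gate_output_spec : Claim_equal_compute_gate_output := by
  intro gate input1 input2 _ hpre
  unfold Spec_compute_gate_output
  rcases hpre with h | h | h | h | h <;> subst h
  · rw [pv_alt_eval "AND" 0 0 1 false rfl]
    unfold compute_gate_output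
    simp only [reduceIte]
    apply List.map_congr_left
    intro ab _
    simp
  · rw [pv_alt_eval "OR" 1 1 (-1) false rfl]
    unfold compute_gate_output
    simp only [reduceIte]
    apply List.map_congr_left
    intro ab _
    simp [pv_bor_eq]
    ring
  · rw [pv_alt_eval "NAND" 0 0 1 true rfl]
    unfold compute_gate_output
    simp only [reduceIte]
    apply List.map_congr_left
    intro ab _
    simp [pv_not_band_one]
  · rw [pv_alt_eval "NOR" 1 1 (-1) true rfl]
    unfold compute_gate_output
    simp only [reduceIte]
    apply List.map_congr_left
    intro ab _
    simp only [pv_not_band_one, pv_bor_eq]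
    ring_nf
  · rw [pv_alt_eval "XOR" 1 1 (-2) false rfl]
    unfold compute_gate_output
    simp only [reduceIte]
    apply List.map_congr_left
    intro ab _
    simp [pv_bxor_eq]
    ring
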